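-- pv_equiv track=rewrite | github.com/sternbergm/vector-db-service | vector_db/algorithms.py | _get_neighbor_cells
-- ===== SOURCE A (Python) =====
-- from typing import Dict, List, Tuple, Optional, Set
--
-- def _get_neighbor_cells(center_coords: Tuple[int, ...], radius: int = 1) -> List[Tuple[int, ...]]:
--     """
--     Get neighboring grid cells within given radius.
--
--     Args:
--         center_coords: Center cell coordinates
--         radius: Radius of neighborhood (in cells)
--
--     Returns:
--         List[Tuple[int, ...]]: List of neighbor cell coordinates
--     """
--     neighbors = []
--     dimension = len(center_coords)
--
--     # For high-dimensional spaces, limit the radius to prevent exponential explosion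
--     # In 8D with radius=1, we get 3^8 = 6561 neighbors, which is too many
--     # Use a more conservative approach for high dimensions
--     if dimension > 4:
--         # Use Manhattan distance-based neighbors instead of full hypercube
--         # This gives at most 2*dimension*radius + 1 neighbors
--         neighbors = [center_coords]  # Include center
--
--         for dim in range(dimension):
--             for offset in range(-radius, radius + 1):
--                 if offset != 0:
--                     neighbor_coords = list(center_coords)
--                     neighbor_coords[dim] += offset
--                     neighbors.append(tuple(neighbor_coords))
--     else:
--         # For lower dimensions, use full hypercube neighbors
--         def generate_offsets(dim_remaining, current_offset):
--             if dim_remaining == 0: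
--                 neighbor_coords = tuple(center_coords[i] + current_offset[i]
--                                       for i in range(dimension))
--                 neighbors.append(neighbor_coords)
--                 return
--
--             for offset in range(-radius, radius + 1):
--                 generate_offsets(dim_remaining - 1, current_offset + [offset])
--
--         generate_offsets(dimension, [])
--
--     return neighbors
-- ===== SOURCE B (Python) =====
-- from itertools import product
--
-- def _get_neighbor_cells(center_coords, radius=1):
--     dimension = len(center_coords)
--     if dimension > 4:
--         # Manhattan-style neighbors: center first, then each axis bumped by each nonzero offset
--         return [center_coords] + [
--             center_coords[:dim] + (center_coords[dim] + offset,) + center_coords[dim + 1:]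
--             for dim in range(dimension)
--             for offset in range(-radius, radius + 1) if offset != 0
--         ]
--     return [tuple(c + o for c, o in zip(center_coords, offs))
--             for offs in product(range(-radius, radius + 1), repeat=dimension)]
-- ===== Notes on version B (the rewrite author's own statement) =====
-- stated objective: idiomatic
-- what changed: The recursive generate_offsets helper that mutates a shared neighbors list is replaced by an itertools.product(range(-radius,radius+1), repeat=dimension) comprehension, and the Manhattan branch's mutate-a-copy loop by a slice-concatenation comprehension.
import Mathlib
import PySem

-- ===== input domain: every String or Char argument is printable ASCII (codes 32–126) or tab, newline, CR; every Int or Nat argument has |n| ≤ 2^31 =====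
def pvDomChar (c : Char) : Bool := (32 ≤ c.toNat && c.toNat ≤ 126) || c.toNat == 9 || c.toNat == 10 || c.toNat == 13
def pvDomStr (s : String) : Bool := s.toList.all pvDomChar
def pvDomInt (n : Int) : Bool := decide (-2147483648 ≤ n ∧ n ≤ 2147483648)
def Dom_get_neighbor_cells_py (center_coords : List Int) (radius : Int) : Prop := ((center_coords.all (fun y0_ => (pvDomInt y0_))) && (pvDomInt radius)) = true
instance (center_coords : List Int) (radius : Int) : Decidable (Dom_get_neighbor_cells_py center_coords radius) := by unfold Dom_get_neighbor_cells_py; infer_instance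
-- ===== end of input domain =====

-- B replaces A's recursive offset generator by an itertools.product comprehension and the
-- mutate-a-copy Manhattan loop by a slice-based comprehension (objective: idiomatic).

-- ===== PORT A =====

-- range(-radius, radius + 1)
def pvRng (radius : Int) : List Int := PySem.List.pyRange (-radius) (radius + 1) 1

-- A's inner recursive helper generate_offsets, threading the shared `neighbors` list as acc
def pvGenOffsets (center : List Int) (radius : Int) (dimension : Nat) :
    Nat → List Int → List (List Int) → List (List Int)
  | 0, cur, acc =>
      acc ++ [(PySem.List.pyRange 0 dimension 1).map
        (fun i => PySem.List.pyGetD center i 0 + PySem.List.pyGetD cur i 0)]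
  | k+1, cur, acc =>
      (pvRng radius).foldl
        (fun acc offset => pvGenOffsets center radius dimension k (cur ++ [offset]) acc) acc

def get_neighbor_cells_py (center_coords : List Int) (radius : Int) : List (List Int) :=
  let dimension := center_coords.length
  if dimension > 4 then
    (PySem.List.pyRange 0 dimension 1).foldl (fun neighbors dim =>
      (pvRng radius).foldl (fun neighbors offset =>
        if offset ≠ 0 then
          neighbors ++
            [PySem.List.pySetD center_coords dim
              (PySem.List.pyGetD center_coords dim 0 + offset)]
        else neighbors) neighbors) [center_coords]
  else
    pvGenOffsets center_coords radius dimension dimension [] []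

-- ===== PORT B =====

-- itertools.product(rng, repeat = n): first coordinate slowest, last fastest
-- range(-radius, radius + 1) (B side)
def pvRngB (radius : Int) : List Int := PySem.List.pyRange (-radius) (radius + 1) 1

def pvProdRep (rng : List Int) : Nat → List (List Int)
  | 0 => [[]]
  | n+1 => rng.flatMap (fun x => (pvProdRep rng n).map (fun t => x :: t))

def get_neighbor_cells_py_alt (center_coords : List Int) (radius : Int) : List (List Int) :=
  let dimension := center_coords.length
  if dimension > 4 then
    [center_coords] ++ (PySem.List.pyRange 0 dimension 1).flatMap (fun dim =>
      ((pvRngB radius).filter (fun offset => offset ≠ 0)).map (fun offset =>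
        PySem.List.slice center_coords none (some dim)
          ++ [PySem.List.pyGetD center_coords dim 0 + offset]
          ++ PySem.List.slice center_coords (some (dim + 1)) none))
  else
    (pvProdRep (pvRngB radius) dimension).map
      (fun offs => List.zipWith (· + ·) center_coords offs)

-- ===== PRECONDITION & SPEC =====
def Spec_get_neighbor_cells_py (center_coords : List Int) (radius : Int) (out : List (List Int)) : Prop := out = get_neighbor_cells_py_alt center_coords radius
instance (center_coords : List Int) (radius : Int) (out : List (List Int)) : Decidable (Spec_get_neighbor_cells_py center_coords radius out) := by unfold Spec_get_neighbor_cells_py; infer_instance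

-- ===== CLAIM (what is proved, stated in full; the proofs are below) =====
def Claim_equal_get_neighbor_cells_py : Prop := ∀ (center_coords : List Int) (radius : Int), Dom_get_neighbor_cells_py center_coords radius → Spec_get_neighbor_cells_py center_coords radius (get_neighbor_cells_py center_coords radius)

-- ===== LEMMAS AND PROOFS =====

lemma pvRngB_eq_pvRng : pvRngB = pvRng := rfl

lemma pvProdRep_length (rng : List Int) : ∀ (k : Nat), ∀ t ∈ pvProdRep rng k, t.length = k := by
  intro k
  induction k with
  | zero => intro t ht; simp [pvProdRep] at ht; simp [ht]
  | succ n ih =>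
      intro t ht
      simp only [pvProdRep, List.mem_flatMap, List.mem_map] at ht
      obtain ⟨x, _, t', ht', rfl⟩ := ht
      simp [ih t' ht']

-- the leaf tuple of A equals B's zipWith when the offset list has full length
lemma pv_mk_eq_zipWith (center : List Int) (offs : List Int)
    (h : offs.length = center.length) :
    (PySem.List.pyRange 0 center.length 1).map
        (fun i => PySem.List.pyGetD center i 0 + PySem.List.pyGetD offs i 0)
      = List.zipWith (· + ·) center offs := by
  rw [PySem.List.pyRange_zero_nat]
  apply List.ext_getElem
  · simp [h]
  · intro i h1 h2
    simp only [List.getElem_map, List.getElem_range, List.getElem_zipWith]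
    simp only [List.length_map, List.length_range] at h1
    rw [PySem.List.pyGetD_natCast, PySem.List.pyGetD_natCast]
    simp [h1, h.symm ▸ h1]

lemma pv_foldl_append_ite {α β : Type} (p : α → Prop) [DecidablePred p] (f : α → β)
    (l : List α) : ∀ (acc : List β),
    l.foldl (fun acc x => if p x then acc ++ [f x] else acc) acc
      = acc ++ (l.filter (fun x => decide (p x))).map f := by
  induction l with
  | nil => intro acc; simp
  | cons y ys ih =>
      intro acc
      by_cases hy : p y <;> simp [List.foldl_cons, hy, ih]

lemma pvGenOffsets_eq (center : List Int) (radius : Int) (d : Nat) :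
    ∀ (k : Nat) (cur : List Int) (acc : List (List Int)),
      pvGenOffsets center radius d k cur acc
        = acc ++ (pvProdRep (pvRng radius) k).map (fun rest =>
            (PySem.List.pyRange 0 d 1).map
              (fun i => PySem.List.pyGetD center i 0 + PySem.List.pyGetD (cur ++ rest) i 0)) := by
  intro k
  induction k with
  | zero => intro cur acc; simp [pvGenOffsets, pvProdRep]
  | succ n ih =>
      intro cur acc
      show (pvRng radius).foldl
        (fun acc offset => pvGenOffsets center radius d n (cur ++ [offset]) acc) acc = _
      have hfun : (fun acc offset => pvGenOffsets center radius d n (cur ++ [offset]) acc)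
          = (fun (acc : List (List Int)) (offset : Int) =>
              acc ++ ((pvProdRep (pvRng radius) n).map (fun rest =>
                (PySem.List.pyRange 0 d 1).map
                  (fun i => PySem.List.pyGetD center i 0
                    + PySem.List.pyGetD (cur ++ (offset :: rest)) i 0)))) := by
        funext a o
        rw [ih]
        simp [List.append_assoc]
      rw [hfun, PySem.List.foldl_append_eq_flatMap]
      simp only [pvProdRep, List.map_flatMap, List.map_map]
      rfl

-- Manhattan element: A's pySetD copy equals B's slice concatenation, for dim ∈ range(d)
lemma pv_set_eq_slices (center : List Int) (offset : Int) (dim : Nat) (h : dim < center.length) :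
    PySem.List.pySetD center (dim : Int)
        (PySem.List.pyGetD center (dim : Int) 0 + offset)
      = PySem.List.slice center none (some (dim : Int))
          ++ [PySem.List.pyGetD center (dim : Int) 0 + offset]
          ++ PySem.List.slice center (some ((dim : Int) + 1)) none := by
  have h1 : ((dim : Int) + 1) = ((dim + 1 : Nat) : Int) := by push_cast; ring
  rw [PySem.List.pySetD_natCast, PySem.List.slice_to_natCast, h1,
    PySem.List.slice_from_natCast]
  rw [List.set_eq_take_append_cons_drop]
  simp [h]

-- ===== VERDICT (by name: the statement is the Claim_ definition above) =====
theorem get_neighbor_cells_py_spec : Claim_equal_get_neighbor_cells_py := by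
  unfold Claim_equal_get_neighbor_cells_py Spec_get_neighbor_cells_py
  intro center radius _
  unfold get_neighbor_cells_py get_neighbor_cells_py_alt
  simp only [pvRngB_eq_pvRng]
  by_cases hd : center.length > 4
  · simp only [hd, if_true]
    have hinner : ∀ (nb : List (List Int)) (dim : Int), dim ∈ PySem.List.pyRange 0 center.length 1 →
        (pvRng radius).foldl (fun neighbors offset =>
          if offset ≠ 0 then
            neighbors ++ [PySem.List.pySetD center dim
              (PySem.List.pyGetD center dim 0 + offset)]
          else neighbors) nb
        = nb ++ ((pvRng radius).filter (fun offset => decide (offset ≠ 0))).map (fun offset =>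
            PySem.List.slice center none (some dim)
              ++ [PySem.List.pyGetD center dim 0 + offset]
              ++ PySem.List.slice center (some (dim + 1)) none) := by
      intro nb dim hmem
      rw [PySem.List.mem_pyRange_one] at hmem
      obtain ⟨hd0, hdlt⟩ := hmem
      obtain ⟨n, rfl⟩ := Int.eq_ofNat_of_zero_le hd0
      have hn : n < center.length := by exact_mod_cast hdlt
      rw [pv_foldl_append_ite (fun offset => offset ≠ 0)
        (fun offset => PySem.List.pySetD center (n : Int)
          (PySem.List.pyGetD center (n : Int) 0 + offset)) (pvRng radius) nb]
      congr 1
      apply List.map_congr_left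
      intro offset _
      exact pv_set_eq_slices center offset n hn
    have houter := PySem.List.foldl_congr_mem
      (l := PySem.List.pyRange 0 (center.length : Int) 1)
      (init := ([center] : List (List Int)))
      (f := fun neighbors dim => (pvRng radius).foldl (fun neighbors offset =>
          if offset ≠ 0 then
            neighbors ++ [PySem.List.pySetD center dim
              (PySem.List.pyGetD center dim 0 + offset)]
          else neighbors) neighbors)
      (g := fun nb dim =>
          nb ++ ((pvRng radius).filter (fun offset => decide (offset ≠ 0))).map (fun offset =>
            PySem.List.slice center none (some dim)
              ++ [PySem.List.pyGetD center dim 0 + offset]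
              ++ PySem.List.slice center (some (dim + 1)) none))
      (by intro a x hx; exact hinner a x hx)
    rw [houter, PySem.List.foldl_append_eq_flatMap]
  · simp only [hd, if_false]
    rw [pvGenOffsets_eq]
    simp only [List.nil_append]
    apply List.map_congr_left
    intro offs hoffs
    exact pv_mk_eq_zipWith center offs (pvProdRep_length _ _ offs hoffs)
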